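-- pv_equiv track=rewrite | github.com/NOSC1985/UniversityWorkshopsCP1404 | week5/memberwise_addition.py | memberwise_addition
-- ===== SOURCE A (Python) =====
-- def memberwise_addition(number_list_one, number_list_two):
--     memberwise_added_list = []
--
--     if len(number_list_one) == len(number_list_two):
--         for i in range(0, len(number_list_one), 1):
--             memberwise_added_list.append(number_list_one[i]+number_list_two[i])
--
--     elif len(number_list_one) > len(number_list_two):
--         for i in range(0, len(number_list_two), 1):
--             memberwise_added_list.append(number_list_one[i]+number_list_two[i])
--         for i in range(len(number_list_two), len(number_list_one), 1):
--             memberwise_added_list.append(number_list_one[i])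
--     elif len(number_list_one) < len(number_list_two):
--         for i in range(0, len(number_list_one), 1):
--             memberwise_added_list.append(number_list_one[i]+number_list_two[i])
--         for i in range(len(number_list_one), len(number_list_two), 1):
--             memberwise_added_list.append(number_list_two[i])
--
--     return memberwise_added_list
-- ===== SOURCE B (Python) =====
-- def memberwise_addition(number_list_one, number_list_two):
--     if not number_list_one:
--         return list(number_list_two)
--     if not number_list_two:
--         return list(number_list_one)
--     return ([number_list_one[0] + number_list_two[0]]
--             + memberwise_addition(number_list_one[1:], number_list_two[1:]))
-- ===== Notes on version B (the rewrite author's own statement) =====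
-- stated objective: alternative
-- what changed: Replaces the three length-comparison branches of indexed range loops and an accumulator list by structural recursion on both lists at once: peel one head off each, add them, and recurse on the tails, with the base cases returning the remaining list directly (no length computation, no index arithmetic, no accumulator).
import Mathlib
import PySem

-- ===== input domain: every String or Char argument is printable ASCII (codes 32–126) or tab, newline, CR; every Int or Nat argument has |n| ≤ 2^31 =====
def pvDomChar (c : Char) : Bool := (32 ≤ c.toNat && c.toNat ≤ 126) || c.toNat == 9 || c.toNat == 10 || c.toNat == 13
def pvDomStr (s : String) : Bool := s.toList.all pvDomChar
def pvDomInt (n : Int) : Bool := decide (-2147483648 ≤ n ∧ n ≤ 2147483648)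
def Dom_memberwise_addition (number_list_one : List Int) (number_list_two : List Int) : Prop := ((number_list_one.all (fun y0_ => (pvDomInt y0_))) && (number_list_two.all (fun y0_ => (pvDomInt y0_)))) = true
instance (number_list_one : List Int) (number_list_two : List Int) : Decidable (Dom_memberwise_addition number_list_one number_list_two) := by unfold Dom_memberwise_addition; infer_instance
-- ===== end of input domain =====

-- B replaces A's three length-comparison branches of indexed loops by structural
-- recursion on both lists (different decomposition; same O(n) element cost).


-- ===== PORT A =====
-- literal transliteration: three branches on the length comparison, each an index loop
-- over range(...) appending to the accumulator; xs[i] is in range so pyGetD is exact.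
def memberwise_addition (number_list_one : List Int) (number_list_two : List Int) : List Int :=
  let memberwise_added_list : List Int := []
  if (number_list_one.length : Int) = (number_list_two.length : Int) then
    (PySem.List.pyRange 0 (number_list_one.length : Int) 1).foldl
      (fun acc i => acc ++ [PySem.List.pyGetD number_list_one i 0 + PySem.List.pyGetD number_list_two i 0])
      memberwise_added_list
  else if (number_list_one.length : Int) > (number_list_two.length : Int) then
    let acc1 :=
      (PySem.List.pyRange 0 (number_list_two.length : Int) 1).foldl
        (fun acc i => acc ++ [PySem.List.pyGetD number_list_one i 0 + PySem.List.pyGetD number_list_two i 0])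
        memberwise_added_list
    (PySem.List.pyRange (number_list_two.length : Int) (number_list_one.length : Int) 1).foldl
      (fun acc i => acc ++ [PySem.List.pyGetD number_list_one i 0]) acc1
  else if (number_list_one.length : Int) < (number_list_two.length : Int) then
    let acc1 :=
      (PySem.List.pyRange 0 (number_list_one.length : Int) 1).foldl
        (fun acc i => acc ++ [PySem.List.pyGetD number_list_one i 0 + PySem.List.pyGetD number_list_two i 0])
        memberwise_added_list
    (PySem.List.pyRange (number_list_one.length : Int) (number_list_two.length : Int) 1).foldl
      (fun acc i => acc ++ [PySem.List.pyGetD number_list_two i 0]) acc1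
  else memberwise_added_list

-- ===== PORT B =====
-- structural recursion on both lists: empty cases return the other list,
-- otherwise [head1+head2] ++ recursion on the tails (xs[1:] = the tail).
def memberwise_addition_alt : List Int → List Int → List Int
  | [], l2 => l2
  | l1, [] => l1
  | a :: t1, b :: t2 => [a + b] ++ memberwise_addition_alt t1 t2

-- ===== PRECONDITION & SPEC =====
def Spec_memberwise_addition (number_list_one : List Int) (number_list_two : List Int) (out : List Int) : Prop := out = memberwise_addition_alt number_list_one number_list_two
instance (number_list_one : List Int) (number_list_two : List Int) (out : List Int) : Decidable (Spec_memberwise_addition number_list_one number_list_two out) := by unfold Spec_memberwise_addition; infer_instance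

-- ===== CLAIM (what is proved, stated in full; the proofs are below) =====
def Claim_equal_memberwise_addition : Prop := ∀ (number_list_one : List Int) (number_list_two : List Int), Dom_memberwise_addition number_list_one number_list_two → Spec_memberwise_addition number_list_one number_list_two (memberwise_addition number_list_one number_list_two)

-- ===== LEMMAS AND PROOFS =====

-- B in closed form: zip-map of the common prefix, then the leftover tails
theorem alt_closed (l1 l2 : List Int) :
    memberwise_addition_alt l1 l2
      = ((l1.zip l2).map (fun p => p.1 + p.2))
        ++ l1.drop (min l1.length l2.length) ++ l2.drop (min l1.length l2.length) := by
  induction l1 generalizing l2 with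
  | nil => cases l2 <;> simp [memberwise_addition_alt]
  | cons a t ih =>
    cases l2 with
    | nil => simp [memberwise_addition_alt]
    | cons b u => simp [memberwise_addition_alt, ih u, Nat.succ_min_succ]

-- the prefix map over indices 0..min-1 is the zip-map
theorem prefix_map_eq_zip (l1 l2 : List Int) :
    (List.range (min l1.length l2.length)).map (fun k => l1.getD k 0 + l2.getD k 0)
      = (l1.zip l2).map (fun p => p.1 + p.2) := by
  induction l1 generalizing l2 with
  | nil => simp
  | cons a t ih =>
    cases l2 with
    | nil => simp
    | cons b u =>
      simp [Nat.succ_min_succ, List.range_succ_eq_map, List.map_map]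
      exact ih u

theorem prefix_fold_eq (l1 l2 : List Int) (n : Nat) (hn : n = min l1.length l2.length) :
    (PySem.List.pyRange 0 (n : Int) 1).foldl
      (fun acc i => acc ++ [PySem.List.pyGetD l1 i 0 + PySem.List.pyGetD l2 i 0]) []
      = (l1.zip l2).map (fun p => p.1 + p.2) := by
  subst hn
  rw [PySem.List.foldl_append_singleton_eq_map, PySem.List.pyRange_one]
  simp only [sub_zero, Int.toNat_natCast, List.map_map]
  rw [← prefix_map_eq_zip l1 l2]
  apply List.map_congr_left
  intro k hk
  simp [Function.comp, PySem.List.pyGetD_natCast]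

theorem tail_fold_eq (xs : List Int) (m : Nat) (init : List Int) :
    (PySem.List.pyRange (m : Int) (xs.length : Int) 1).foldl
      (fun acc i => acc ++ [PySem.List.pyGetD xs i 0]) init = init ++ xs.drop m := by
  rw [PySem.List.foldl_append_singleton_eq_map]
  congr 1
  have := PySem.List.map_pyGetD_pyRange' xs (0 : Int) (a := (m : Int)) (by positivity)
  simpa using this

-- ===== VERDICT (by name: the statement is the Claim_ definition above) =====
theorem memberwise_addition_spec : Claim_equal_memberwise_addition := by
  intro l1 l2 _
  show memberwise_addition l1 l2 = memberwise_addition_alt l1 l2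
  rw [alt_closed]
  unfold memberwise_addition
  rcases lt_trichotomy l1.length l2.length with h | h | h
  · have h1 : ¬ ((l1.length : Int) = (l2.length : Int)) := by exact_mod_cast Nat.ne_of_lt h
    have h2 : ¬ ((l1.length : Int) > (l2.length : Int)) := by exact_mod_cast Nat.not_lt.mpr h.le
    have h3 : (l1.length : Int) < (l2.length : Int) := by exact_mod_cast h
    simp only [h1, h2, h3, if_true, if_false]
    rw [prefix_fold_eq l1 l2 l1.length (by omega), tail_fold_eq l2 l1.length]
    have hm : min l1.length l2.length = l1.length := by omega
    simp [hm, List.drop_of_length_le (le_refl l1.length)]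
  · have h1 : (l1.length : Int) = (l2.length : Int) := by exact_mod_cast h
    simp only [h1, if_true]
    rw [show (l2.length : Int) = ((min l1.length l2.length : Nat) : Int) by simp [h],
        prefix_fold_eq l1 l2 (min l1.length l2.length) rfl]
    have hm : min l1.length l2.length = l1.length := by omega
    simp [h]
  · have h1 : ¬ ((l1.length : Int) = (l2.length : Int)) := by exact_mod_cast Nat.ne_of_gt h
    have h2 : (l1.length : Int) > (l2.length : Int) := by exact_mod_cast h
    simp only [h1, h2, if_true, if_false]
    rw [prefix_fold_eq l1 l2 l2.length (by omega), tail_fold_eq l1 l2.length]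
    have hm : min l1.length l2.length = l2.length := by omega
    simp [hm, List.drop_of_length_le (le_refl l2.length)]
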